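-- pv_equiv track=rewrite | github.com/Adiaslow/Conformacophore | src/core/domain/implementations/clique_plus_superimposer.py | node_match
-- ===== SOURCE A (Python) =====
-- from typing import List, Tuple, Optional, Dict, Set, Any, FrozenSet, cast
--
-- def node_match(node1: Dict[str, Any], node2: Dict[str, Any]) -> bool:
--     """Check if two nodes match based on chemical properties.
--
--     Args:
--         node1: First node's attributes
--         node2: Second node's attributes
--
--     Returns:
--         True if nodes match chemically, False otherwise
--     """
--     # Must have element attribute
--     if "element" not in node1 or "element" not in node2:
--         return False
--
--     # Get cleaned element values
--     element1 = str(node1.get("element", "")).strip().upper()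
--     element2 = str(node2.get("element", "")).strip().upper()
--
--     # Skip hydrogens for now as they can be more flexible
--     if element1 == "H" or element2 == "H":
--         return False
--
--     # First try exact element match
--     if element1 == element2:
--         return True
--
--     # Define groups of chemically similar elements
--     similar_elements = {
--         frozenset(["C", "X", "DU"]): "Carbon and dummy atoms",
--         frozenset(["N", "NX"]): "Nitrogen atoms",
--         frozenset(["O", "OX"]): "Oxygen atoms",
--         frozenset(["S", "SX"]): "Sulfur atoms",
--         frozenset(["P", "PX"]): "Phosphorus atoms",
--         frozenset(["F", "CL", "BR", "I"]): "Halogens",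
--     }
--
--     # Check if elements belong to the same group
--     for group in similar_elements:
--         if element1 in group and element2 in group:
--             return True
--
--     return False
-- ===== SOURCE B (Python) =====
-- from typing import Dict, Any
--
-- # Flat element -> group-id index; replaces A's scan over frozenset groups.
-- ELEMENT_GROUP = {
--     "C": 0, "X": 0, "DU": 0,
--     "N": 1, "NX": 1,
--     "O": 2, "OX": 2,
--     "S": 3, "SX": 3,
--     "P": 4, "PX": 4,
--     "F": 5, "CL": 5, "BR": 5, "I": 5,
-- }
--
--
-- def node_match(node1: Dict[str, Any], node2: Dict[str, Any]) -> bool: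
--     if "element" not in node1 or "element" not in node2:
--         return False
--
--     element1 = str(node1.get("element", "")).strip().upper()
--     element2 = str(node2.get("element", "")).strip().upper()
--
--     if element1 == "H" or element2 == "H":
--         return False
--
--     if element1 == element2:
--         return True
--
--     g1 = ELEMENT_GROUP.get(element1)
--     g2 = ELEMENT_GROUP.get(element2)
--     return g1 is not None and g1 == g2
-- ===== Notes on version B (the rewrite author's own statement) =====
-- stated objective: simpler
-- what changed: Replaces A's per-call construction of a dict of frozenset groups and the loop scanning every group for joint membership with a module-level flat element-to-group-id table and two direct lookups compared for equality.
import Mathlib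
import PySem

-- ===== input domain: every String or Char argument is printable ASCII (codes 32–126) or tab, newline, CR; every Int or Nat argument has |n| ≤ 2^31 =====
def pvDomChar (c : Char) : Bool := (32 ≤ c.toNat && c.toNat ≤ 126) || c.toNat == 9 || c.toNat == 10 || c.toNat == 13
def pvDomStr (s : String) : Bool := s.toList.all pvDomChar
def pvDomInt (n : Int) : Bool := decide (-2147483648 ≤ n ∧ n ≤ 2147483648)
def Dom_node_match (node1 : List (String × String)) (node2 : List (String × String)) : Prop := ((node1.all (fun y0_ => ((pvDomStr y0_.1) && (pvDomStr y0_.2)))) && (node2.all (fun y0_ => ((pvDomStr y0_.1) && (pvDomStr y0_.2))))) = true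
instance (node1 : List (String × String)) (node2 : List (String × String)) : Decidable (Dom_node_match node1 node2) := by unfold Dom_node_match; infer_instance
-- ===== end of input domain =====

-- B replaces A's per-call dict of frozenset groups and its group-scan loop with a flat
-- element→group-id table and two direct lookups (objective: simpler).

-- ===== PORT A =====
-- Dicts are association lists; PySem.Dict.mk gives Python's first-match lookup semantics.
def node_match (node1 : List (String × String)) (node2 : List (String × String)) : Bool :=
  let d1 := PySem.Dict.mk node1
  let d2 := PySem.Dict.mk node2
  if !d1.contains "element" || !d2.contains "element" then false
  else
    let element1 := PySem.Str.upper (PySem.Str.strip (d1.getD "element" ""))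
    let element2 := PySem.Str.upper (PySem.Str.strip (d2.getD "element" ""))
    if element1 == "H" || element2 == "H" then false
    else if element1 == element2 then true
    else
      -- for group in similar_elements: if element1 in group and element2 in group: return True
      [["C","X","DU"], ["N","NX"], ["O","OX"], ["S","SX"], ["P","PX"], ["F","CL","BR","I"]].any
        (fun g => g.contains element1 && g.contains element2)

-- ===== PORT B =====
def ELEMENT_GROUP : PySem.Dict String Int :=
  PySem.Dict.mk [("C",0),("X",0),("DU",0),("N",1),("NX",1),("O",2),("OX",2),
                 ("S",3),("SX",3),("P",4),("PX",4),("F",5),("CL",5),("BR",5),("I",5)]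

def node_match_alt (node1 : List (String × String)) (node2 : List (String × String)) : Bool :=
  let d1 := PySem.Dict.mk node1
  let d2 := PySem.Dict.mk node2
  if !d1.contains "element" || !d2.contains "element" then false
  else
    let element1 := PySem.Str.upper (PySem.Str.strip (d1.getD "element" ""))
    let element2 := PySem.Str.upper (PySem.Str.strip (d2.getD "element" ""))
    if element1 == "H" || element2 == "H" then false
    else if element1 == element2 then true
    else
      -- g1 = ELEMENT_GROUP.get(element1); g2 = ELEMENT_GROUP.get(element2); g1 is not None and g1 == g2
      match ELEMENT_GROUP.get? element1, ELEMENT_GROUP.get? element2 with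
      | some g1, some g2 => g1 == g2
      | _, _ => false

-- ===== PRECONDITION & SPEC =====
def Spec_node_match (node1 : List (String × String)) (node2 : List (String × String)) (out : Bool) : Prop := out = node_match_alt node1 node2
instance (node1 : List (String × String)) (node2 : List (String × String)) (out : Bool) : Decidable (Spec_node_match node1 node2 out) := by unfold Spec_node_match; infer_instance

-- ===== CLAIM (what is proved, stated in full; the proofs are below) =====
def Claim_equal_node_match : Prop := ∀ (node1 : List (String × String)) (node2 : List (String × String)), Dom_node_match node1 node2 → Spec_node_match node1 node2 (node_match node1 node2)

-- ===== LEMMAS AND PROOFS =====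

-- The two tails agree on every pair of strings: joint membership in one of A's groups
-- is exactly equality of B's group ids.
theorem pv_tail_eq (s t : String) :
    ([["C","X","DU"], ["N","NX"], ["O","OX"], ["S","SX"], ["P","PX"], ["F","CL","BR","I"]].any
        (fun g => g.contains s && g.contains t))
    = (match ELEMENT_GROUP.get? s, ELEMENT_GROUP.get? t with
       | some g1, some g2 => g1 == g2
       | _, _ => false) := by
  rw [Bool.eq_iff_iff]
  constructor
  · intro h
    simp only [List.any_eq_true, List.contains_eq_mem, Bool.and_eq_true, decide_eq_true_eq] at h
    obtain ⟨g, hg, hs, ht⟩ := h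
    simp only [List.mem_cons, List.not_mem_nil, or_false] at hg
    rcases hg with rfl | rfl | rfl | rfl | rfl | rfl <;>
      simp only [List.mem_cons, List.not_mem_nil, or_false] at hs ht <;>
      first
        | (rcases hs with rfl | rfl <;> rcases ht with rfl | rfl <;> decide)
        | (rcases hs with rfl | rfl | rfl <;> rcases ht with rfl | rfl | rfl <;> decide)
        | (rcases hs with rfl | rfl | rfl | rfl <;> rcases ht with rfl | rfl | rfl | rfl <;> decide)
  · intro h
    cases hgs : ELEMENT_GROUP.get? s with
    | none => rw [hgs] at h; cases hgt : ELEMENT_GROUP.get? t <;> rw [hgt] at h <;> simp at h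
    | some n =>
      cases hgt : ELEMENT_GROUP.get? t with
      | none => rw [hgs, hgt] at h; simp at h
      | some m =>
        rw [hgs, hgt] at h
        have hnm : n = m := by simpa using h
        subst hnm
        have Hs : (s, n) ∈ ELEMENT_GROUP.items := PySem.Dict.mem_items_of_get?_eq_some _ hgs
        have Ht : (t, n) ∈ ELEMENT_GROUP.items := PySem.Dict.mem_items_of_get?_eq_some _ hgt
        simp only [ELEMENT_GROUP, List.mem_cons, List.not_mem_nil, or_false, Prod.mk.injEq] at Hs Ht
        rcases Hs with ⟨rfl,rfl⟩|⟨rfl,rfl⟩|⟨rfl,rfl⟩|⟨rfl,rfl⟩|⟨rfl,rfl⟩|⟨rfl,rfl⟩|⟨rfl,rfl⟩|⟨rfl,rfl⟩|⟨rfl,rfl⟩|⟨rfl,rfl⟩|⟨rfl,rfl⟩|⟨rfl,rfl⟩|⟨rfl,rfl⟩|⟨rfl,rfl⟩|⟨rfl,rfl⟩ <;>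
          rcases Ht with ⟨rfl,hn⟩|⟨rfl,hn⟩|⟨rfl,hn⟩|⟨rfl,hn⟩|⟨rfl,hn⟩|⟨rfl,hn⟩|⟨rfl,hn⟩|⟨rfl,hn⟩|⟨rfl,hn⟩|⟨rfl,hn⟩|⟨rfl,hn⟩|⟨rfl,hn⟩|⟨rfl,hn⟩|⟨rfl,hn⟩|⟨rfl,hn⟩ <;>
          first | decide | simp at hn

-- ===== VERDICT (by name: the statement is the Claim_ definition above) =====
theorem node_match_spec : Claim_equal_node_match := by
  intro node1 node2 _
  unfold Spec_node_match node_match node_match_alt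
  simp only [pv_tail_eq]
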